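-- pv_equiv track=rewrite | github.com/trihoangdev/python-28tech | contest-03/ex16.py | check
-- ===== SOURCE A (Python) =====
-- def check(n):
--     if n < 100 and n % 10 == 2 * (n // 10):
--         return True
--     last = n % 10
--     n //= 10
--     temp = n
--     res = 0
--     cnt = 0
--     while n > 9:
--         cnt += 1
--         res = res * 10 + n % 10
--         n //= 10
--     if res == temp % (10 ** cnt) and (last == 2 * n or n == 2 * last):
--         return True
--     else:
--         return False
-- ===== SOURCE B (Python) =====
-- def check(n):
--     if n < 0:
--         return False
--     digits = []
--     m = n
--     while m > 0:
--         digits.append(m % 10)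
--         m //= 10
--     if not digits:
--         digits = [0]
--     last = digits[0]       # least-significant digit of n
--     first = digits[-1]     # most-significant digit of n
--     mid = digits[1:-1]
--     return mid == mid[::-1] and (last == 2 * first or first == 2 * last)
-- ===== Notes on version B (the rewrite author's own statement) =====
-- stated objective: simpler
-- what changed: B extracts the decimal digits into a list once and checks the middle slice for palindromicity by list reversal plus the first/last doubling relation, instead of A's interleaved numeric reversal loop with modulus-power comparison and a special two-digit pre-branch.
import Mathlib
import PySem

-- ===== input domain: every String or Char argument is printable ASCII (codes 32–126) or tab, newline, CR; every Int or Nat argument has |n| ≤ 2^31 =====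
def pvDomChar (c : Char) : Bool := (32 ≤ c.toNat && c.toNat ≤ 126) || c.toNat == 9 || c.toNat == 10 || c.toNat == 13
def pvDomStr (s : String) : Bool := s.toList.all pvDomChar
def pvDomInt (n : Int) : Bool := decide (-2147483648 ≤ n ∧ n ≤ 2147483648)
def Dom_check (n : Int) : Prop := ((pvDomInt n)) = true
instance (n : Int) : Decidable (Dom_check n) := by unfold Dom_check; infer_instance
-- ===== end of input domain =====

-- B builds the digit list once and tests the middle slice as a palindrome by list
-- reversal, instead of A's interleaved numeric-reversal loop; same cost, simpler.

-- ===== PORT A =====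
-- the while loop of A: while n > 9: cnt += 1; res = res*10 + n%10; n //= 10
def loopA (n res cnt : Int) : Int × Int × Int :=
  if _h : 9 < n then
    loopA (PySem.Int.floordiv n 10) (res * 10 + PySem.Int.mod n 10) (cnt + 1)
  else (n, res, cnt)
termination_by n.toNat
decreasing_by
  have hd : PySem.Int.floordiv n 10 = n / 10 := PySem.Int.floordiv_eq_ediv_of_pos (by omega)
  rw [hd]; omega

def check (n : Int) : Bool :=
  if n < 100 ∧ PySem.Int.mod n 10 = 2 * PySem.Int.floordiv n 10 then true
  else
    let last := PySem.Int.mod n 10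
    let n1 := PySem.Int.floordiv n 10
    let temp := n1
    let t := loopA n1 0 0
    -- cnt starts at 0 and only increments, so '10 ** cnt' is exactly '10 ^ cnt.toNat'
    if t.2.1 = PySem.Int.mod temp (10 ^ t.2.2.toNat) ∧ (last = 2 * t.1 ∨ t.1 = 2 * last) then true
    else false

-- ===== PORT B =====
-- the while loop of B: while m > 0: digits.append(m % 10); m //= 10   (LSB first)
def digitsB (m : Int) : List Int :=
  if _h : 0 < m then PySem.Int.mod m 10 :: digitsB (PySem.Int.floordiv m 10) else []
termination_by m.toNat
decreasing_by
  have hd : PySem.Int.floordiv m 10 = m / 10 := PySem.Int.floordiv_eq_ediv_of_pos (by omega)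
  rw [hd]; omega

def check_alt (n : Int) : Bool :=
  if n < 0 then false
  else
    let ds := digitsB n
    let digits := if ds.isEmpty then [0] else ds
    match PySem.List.pyGet? digits 0, PySem.List.pyGet? digits (-1) with
    | some last, some first =>
      let mid := PySem.List.slice digits (some 1) (some (-1))
      -- mid[::-1] is List.reverse (PySem.List.slice?_none_none_neg_one)
      (mid == mid.reverse) && (last == 2 * first || first == 2 * last)
    | _, _ => false  -- unreachable: digits is nonempty by construction

-- ===== PRECONDITION & SPEC =====
def Spec_check (n : Int) (out : Bool) : Prop := out = check_alt n
instance (n : Int) (out : Bool) : Decidable (Spec_check n out) := by unfold Spec_check; infer_instance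

-- ===== CLAIM (what is proved, stated in full; the proofs are below) =====
def Claim_equal_check : Prop := ∀ (n : Int), Dom_check n → Spec_check n (check n)

-- ===== LEMMAS AND PROOFS =====

-- value of an LSB-first digit list
def valL : List Int → Int
  | [] => 0
  | d :: ds => d + 10 * valL ds

theorem digitsB_eq (m : Int) :
    digitsB m = if 0 < m then m % 10 :: digitsB (m / 10) else [] := by
  rw [digitsB]
  split_ifs with h
  · rw [PySem.Int.mod_eq_emod_of_pos (by omega), PySem.Int.floordiv_eq_ediv_of_pos (by omega)]
  · rfl

theorem loopA_eq (n res cnt : Int) :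
    loopA n res cnt =
      if 9 < n then loopA (n / 10) (res * 10 + n % 10) (cnt + 1) else (n, res, cnt) := by
  rw [loopA]
  split_ifs with h
  · rw [PySem.Int.mod_eq_emod_of_pos (by omega), PySem.Int.floordiv_eq_ediv_of_pos (by omega)]
  · rfl

theorem val_digits (m : Int) (h : 0 ≤ m) : valL (digitsB m) = m := by
  rw [digitsB_eq]
  split_ifs with h1
  · have ih := val_digits (m / 10) (by omega)
    simp [valL, ih]; omega
  · simp [valL]; omega
termination_by m.toNat
decreasing_by omega

theorem digits_bounds (m : Int) : ∀ d ∈ digitsB m, 0 ≤ d ∧ d < 10 := by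
  rw [digitsB_eq]
  split_ifs with h1
  · intro d hd
    rcases List.mem_cons.1 hd with h | h
    · subst h; omega
    · exact digits_bounds (m / 10) d h
  · simp
termination_by m.toNat
decreasing_by omega

theorem val_inj (l1 : List Int) : ∀ l2 : List Int, l1.length = l2.length →
    (∀ d ∈ l1, 0 ≤ d ∧ d < 10) → (∀ d ∈ l2, 0 ≤ d ∧ d < 10) →
    valL l1 = valL l2 → l1 = l2 := by
  induction l1 with
  | nil => intro l2 hl _ _ _; exact (List.length_eq_zero_iff.1 hl.symm).symm
  | cons d ds ih =>
    intro l2 hl hb1 hb2 hv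
    cases l2 with
    | nil => simp at hl
    | cons e es =>
      have hd := hb1 d (by simp)
      have he := hb2 e (by simp)
      simp only [valL] at hv
      have hde : d = e ∧ valL ds = valL es := by omega
      have := ih es (by simpa using hl) (fun x hx => hb1 x (by simp [hx]))
        (fun x hx => hb2 x (by simp [hx])) hde.2
      simp [hde.1, this]

theorem val_take_mod (l : List Int) : ∀ k : Nat, (∀ d ∈ l, 0 ≤ d ∧ d < 10) →
    valL l % 10 ^ k = valL (l.take k) := by
  induction l with
  | nil => intro k _; simp [valL]
  | cons d ds ih =>
    intro k hb
    cases k with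
    | zero => simp [valL]
    | succ k =>
      have hd := hb d (by simp)
      have hbds : ∀ x ∈ ds, 0 ≤ x ∧ x < 10 := fun x hx => hb x (by simp [hx])
      have ihk := ih k hbds
      have hp : (0:Int) < 10 ^ k := by positivity
      have hr0 : 0 ≤ valL ds % 10 ^ k := Int.emod_nonneg _ (by omega)
      have hr1 : valL ds % 10 ^ k < 10 ^ k := Int.emod_lt_of_pos _ hp
      have hsplit : valL (d :: ds) = (d + 10 * (valL ds % 10 ^ k)) + 10 ^ (k+1) * (valL ds / 10 ^ k) := by
        have := Int.emod_add_ediv (valL ds) (10 ^ k)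
        simp only [valL]; ring_nf; nlinarith [Int.emod_add_ediv (valL ds) (10 ^ k)]
      rw [hsplit, Int.add_mul_emod_self_left,
        Int.emod_eq_of_lt (by omega) (by rw [pow_succ]; omega)]
      simp [valL, ihk]
theorem val_append_single (l : List Int) (d : Int) :
    valL (l ++ [d]) = valL l + d * 10 ^ l.length := by
  induction l with
  | nil => simp [valL]
  | cons e es ih => simp [valL, ih, pow_succ]; ring

theorem foldl_val (l : List Int) : ∀ acc : Int,
    l.foldl (fun a x => a * 10 + x) acc = acc * 10 ^ l.length + valL l.reverse := by
  induction l with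
  | nil => intro acc; simp [valL]
  | cons d ds ih =>
    intro acc
    simp only [List.foldl_cons, ih, List.reverse_cons, val_append_single,
      List.length_reverse, List.length_cons]
    ring

-- A's while loop as a function of the digit list of n (LSB first, at least one digit)
def loopL : List Int → Int → Int → Int × Int × Int
  | [], res, cnt => (0, res, cnt)
  | [d], res, cnt => (d, res, cnt)
  | d :: e :: ds, res, cnt => loopL (e :: ds) (res * 10 + d) (cnt + 1)

theorem loopA_eq_loopL (m : Int) : ∀ res cnt : Int, 1 ≤ m →
    loopA m res cnt = loopL (digitsB m) res cnt := by
  intro res cnt h1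
  rw [loopA_eq, digitsB_eq, if_pos (show (0:Int) < m by omega)]
  by_cases h9 : 9 < m
  · rw [if_pos h9]
    have h10 : 1 ≤ m / 10 := by omega
    have ih := loopA_eq_loopL (m / 10) (res * 10 + m % 10) (cnt + 1) h10
    have hne : digitsB (m / 10) ≠ [] := by
      rw [digitsB_eq, if_pos (by omega)]; simp
    obtain ⟨e, es, hes⟩ := List.exists_cons_of_ne_nil hne
    rw [ih, hes, loopL]
  · rw [if_neg h9]
    have h0 : m / 10 = 0 := by omega
    have hm : m % 10 = m := by omega
    rw [h0, digitsB_eq, if_neg (by omega), hm, loopL]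
termination_by m.toNat
decreasing_by omega

theorem loopL_spec (ds : List Int) : ∀ (d res cnt : Int),
    loopL (d :: ds) res cnt =
      ((d :: ds).getLastD 0, (d :: ds).dropLast.foldl (fun a x => a * 10 + x) res,
        cnt + ds.length) := by
  induction ds with
  | nil => intro d res cnt; simp [loopL]
  | cons e es ih =>
    intro d res cnt
    rw [loopL, ih e (res * 10 + d) (cnt + 1)]
    simp
    omega

theorem getLast?_eq_getLastD (l : List Int) (h : l ≠ []) : l.getLast? = some (l.getLastD 0) := by
  cases l with
  | nil => simp at h
  | cons d ds => simp [List.getLast?_eq_getLast, List.getLastD_eq_getLast?]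

theorem slice_one_negOne (xs : List Int) :
    PySem.List.slice xs (some 1) (some (-1)) = xs.tail.dropLast := by
  simp only [PySem.List.slice, PySem.List.clampIdx]
  rcases xs with _ | ⟨a, l⟩
  · simp
  · simp [List.dropLast_eq_take]
    split_ifs with h <;> omega

theorem mod_pow10 (a : Int) (k : Nat) : PySem.Int.mod a (10 ^ k) = a % 10 ^ k :=
  PySem.Int.mod_eq_emod_of_pos (by positivity)

theorem check_unfold (n : Int) :
    check n =
      if n < 100 ∧ n % 10 = 2 * (n / 10) then true
      else
        if (loopA (n / 10) 0 0).2.1 = (n / 10) % 10 ^ ((loopA (n / 10) 0 0).2.2).toNat ∧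
            (n % 10 = 2 * (loopA (n / 10) 0 0).1 ∨ (loopA (n / 10) 0 0).1 = 2 * (n % 10)) then true
        else false := by
  simp only [check, PySem.Int.mod_eq_emod_of_pos (show (0:Int) < 10 by norm_num),
    PySem.Int.floordiv_eq_ediv_of_pos (show (0:Int) < 10 by norm_num), mod_pow10]

theorem alt_cons (n d : Int) (rest : List Int) (h0 : ¬ n < 0) (hds : digitsB n = d :: rest) :
    check_alt n =
      ((rest.dropLast == rest.dropLast.reverse) &&
        (d == 2 * ((d :: rest).getLastD 0) || ((d :: rest).getLastD 0) == 2 * d)) := by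
  have hget1 : PySem.List.pyGet? (d :: rest) (-1) = some ((d :: rest).getLastD 0) := by
    rw [PySem.List.pyGet?_neg_one, getLast?_eq_getLastD _ (by simp)]
  simp only [check_alt, if_neg h0, hds, List.isEmpty_cons, Bool.false_eq_true, if_false,
    PySem.List.pyGet?_zero_cons, hget1, slice_one_negOne, List.tail_cons]

theorem check_unfold' (n a b c : Int) (hl : loopA (n / 10) 0 0 = (a, b, c)) :
    check n =
      if n < 100 ∧ n % 10 = 2 * (n / 10) then true
      else
        if b = (n / 10) % 10 ^ c.toNat ∧ (n % 10 = 2 * a ∨ a = 2 * (n % 10)) then true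
        else false := by
  rw [check_unfold, hl]

theorem getLastD_irrel (l : List Int) (h : l ≠ []) (a : Int) : l.getLastD a = l.getLastD 0 := by
  rw [List.getLastD_eq_getLast?, List.getLastD_eq_getLast?, getLast?_eq_getLastD l h]
  rfl

-- ===== VERDICT (by name: the statement is the Claim_ definition above) =====
theorem check_spec : Claim_equal_check := by
  intro n _
  unfold Spec_check
  by_cases hneg : n < 0
  · -- A: the first branch cannot fire, the loop does not run, the final test fails; B: sign guard
    have hl : loopA (n / 10) 0 0 = (n / 10, 0, 0) := by rw [loopA_eq, if_neg (by omega)]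
    rw [check_unfold' n _ _ _ hl]
    have hB : check_alt n = false := by simp [check_alt, if_pos hneg]
    rw [hB]
    split_ifs with h1 h2
    · exact absurd h1.2 (by omega)
    · rcases h2.2 with h | h <;> omega
    · rfl
  by_cases h0 : n = 0
  · subst h0
    have hd0 : digitsB 0 = [] := by rw [digitsB_eq]; simp
    rw [check_unfold, if_pos (by norm_num)]
    simp [check_alt, hd0, slice_one_negOne, PySem.List.pyGet?_neg_one]
  by_cases h9 : n ≤ 9
  · -- one nonzero digit: both sides are False
    have hds : digitsB n = [n] := by
      rw [digitsB_eq, if_pos (by omega)]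
      have h1 : n / 10 = 0 := by omega
      have h2 : n % 10 = n := by omega
      rw [h1, h2, digitsB_eq]
      simp
    have hl : loopA (n / 10) 0 0 = (n / 10, 0, 0) := by rw [loopA_eq, if_neg (by omega)]
    rw [check_unfold' n _ _ _ hl, alt_cons n n [] hneg hds]
    split_ifs with h1 h2
    · exact absurd h1.2 (by omega)
    · rcases h2.2 with h | h <;> omega
    · simp only [List.dropLast_nil, List.reverse_nil, beq_self_eq_true, Bool.true_and,
        List.getLastD_cons, List.getLastD_nil]
      have he : (n == 2 * n) = false := by simp; omega
      rw [he]
      rfl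
  by_cases h99 : n ≤ 99
  · -- two digits: both sides reduce to 'last == 2*first or first == 2*last'
    have hds : digitsB n = [n % 10, n / 10] := by
      rw [digitsB_eq, if_pos (by omega), digitsB_eq, if_pos (by omega)]
      have h1 : n / 10 / 10 = 0 := by omega
      have h2 : n / 10 % 10 = n / 10 := by omega
      rw [h1, h2, digitsB_eq]
      simp
    have hl : loopA (n / 10) 0 0 = (n / 10, 0, 0) := by rw [loopA_eq, if_neg (by omega)]
    rw [check_unfold' n _ _ _ hl, alt_cons n (n % 10) [n / 10] hneg hds]
    simp only [List.dropLast_singleton, List.reverse_nil, beq_self_eq_true, Bool.true_and,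
      List.getLastD_cons, List.getLastD_nil]
    split_ifs with h1 h2
    · have := h1.2
      simp [this]
    · rcases h2.2 with h | h <;> simp [h]
    · have e1 : ¬ n % 10 = 2 * (n / 10) := fun h => h1 ⟨by omega, h⟩
      have e2 : ¬ n / 10 = 2 * (n % 10) := by
        intro h
        exact h2 ⟨by simp, Or.inr h⟩
      simp [e1, e2]
  · -- three or more digits
    have h100 : 100 ≤ n := by omega
    have hmge : 10 ≤ n / 10 := by omega
    obtain ⟨e, es, hes⟩ := List.exists_cons_of_ne_nil
      (show digitsB (n / 10 / 10) ≠ [] by rw [digitsB_eq, if_pos (by omega)]; simp)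
    have hds : digitsB (n / 10) = (n / 10) % 10 :: e :: es := by
      rw [digitsB_eq, if_pos (by omega), hes]
    have hDne : digitsB (n / 10) ≠ [] := by rw [hds]; simp
    have hlen : (digitsB (n / 10)).length = (e :: es).length + 1 := by rw [hds]; rfl
    have hloop : loopA (n / 10) 0 0 =
        ((digitsB (n / 10)).getLastD 0,
          (digitsB (n / 10)).dropLast.foldl (fun a x => a * 10 + x) 0,
          (0 : Int) + (e :: es).length) := by
      rw [loopA_eq_loopL (n / 10) 0 0 (by omega), hds, loopL_spec, ← hds]
    rw [check_unfold' n _ _ _ hloop]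
    rw [if_neg (fun h => absurd h.1 (by omega))]
    -- the modulus-power equals the value of the middle digits
    have hb := digits_bounds (n / 10)
    have htn : ((0 : Int) + ((e :: es).length : Int)).toNat = (e :: es).length := by
      omega
    have hmod : (n / 10) % 10 ^ (e :: es).length = valL (digitsB (n / 10)).dropLast := by
      have h1 := val_take_mod (digitsB (n / 10)) (e :: es).length hb
      rw [val_digits _ (by omega)] at h1
      rw [h1, List.dropLast_eq_take, hlen]
      simp
    have hfold : (digitsB (n / 10)).dropLast.foldl (fun a x => a * 10 + x) 0 =
        valL (digitsB (n / 10)).dropLast.reverse := by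
      rw [foldl_val]; simp
    -- A's palindrome-by-value test is the palindrome test on the middle digit list
    have hbdl : ∀ d ∈ (digitsB (n / 10)).dropLast, 0 ≤ d ∧ d < 10 :=
      fun d hd => hb d (List.dropLast_subset _ hd)
    have hpal : (valL (digitsB (n / 10)).dropLast.reverse = valL (digitsB (n / 10)).dropLast) ↔
        (digitsB (n / 10)).dropLast.reverse = (digitsB (n / 10)).dropLast := by
      constructor
      · intro h
        exact val_inj _ _ (by simp)
          (fun d hd => hbdl d (List.mem_reverse.1 hd)) hbdl h
      · intro h; rw [h]
    -- B's side
    have hdsn : digitsB n = n % 10 :: digitsB (n / 10) := by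
      rw [digitsB_eq, if_pos (by omega)]
    rw [alt_cons n (n % 10) (digitsB (n / 10)) hneg hdsn]
    simp only [List.getLastD_cons, getLastD_irrel _ hDne]
    rw [htn, hmod, hfold]
    set G : Int := (digitsB (n / 10)).getLastD 0 with hG
    by_cases hp : (digitsB (n / 10)).dropLast.reverse = (digitsB (n / 10)).dropLast
    · have hpb : ((digitsB (n / 10)).dropLast == (digitsB (n / 10)).dropLast.reverse) = true := by
        simp [hp]
      rw [hpb]
      by_cases hq : n % 10 = 2 * G
      · rw [if_pos ⟨hpal.2 hp, Or.inl hq⟩]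
        simp [hq]
      · by_cases hr : G = 2 * (n % 10)
        · rw [if_pos ⟨hpal.2 hp, Or.inr hr⟩]
          simp [hr]
        · rw [if_neg (fun h => by rcases h.2 with h' | h'; exacts [hq h', hr h'])]
          simp [hq, hr]
    · have hpb : ((digitsB (n / 10)).dropLast == (digitsB (n / 10)).dropLast.reverse) = false := by
        simp
        exact fun h => hp h.symm
      rw [hpb, if_neg (fun h => hp (hpal.1 h.1))]
      rfl
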